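-- pv_equiv track=rewrite | github.com/BrassBandResults/bbr3 | bbr3/siteutils.py | add_dot_after_initial
-- ===== SOURCE A (Python) =====
-- def add_dot_after_initial(pName):
--     """
--     If there is an initial, but no dot, add the dot
--     """
--     lReturn = pName
--     lPosition = 0
--     if pName.strip().find(' ') == 1:
--         lReturn = ''
--         for char in pName:
--             if char == ' ' and lPosition < 7 :
--                 lReturn += '. '
--             else:
--                 lReturn += char
--             lPosition += 1
--
--     return lReturn
-- ===== SOURCE B (Python) =====
-- def add_dot_after_initial(pName):
--     """
--     If there is an initial, but no dot, add the dot
--     """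
--     if pName.strip().find(' ') == 1:
--         return pName[:7].replace(' ', '. ') + pName[7:]
--     return pName
-- ===== Notes on version B (the rewrite author's own statement) =====
-- stated objective: simpler
-- what changed: Replaced the per-character loop with its index counter and string accumulator by a closed-form expression: under the same guard, replace the spaces in the first seven characters with dot-plus-space via str.replace on the slice and append the untouched tail.
import Mathlib
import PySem

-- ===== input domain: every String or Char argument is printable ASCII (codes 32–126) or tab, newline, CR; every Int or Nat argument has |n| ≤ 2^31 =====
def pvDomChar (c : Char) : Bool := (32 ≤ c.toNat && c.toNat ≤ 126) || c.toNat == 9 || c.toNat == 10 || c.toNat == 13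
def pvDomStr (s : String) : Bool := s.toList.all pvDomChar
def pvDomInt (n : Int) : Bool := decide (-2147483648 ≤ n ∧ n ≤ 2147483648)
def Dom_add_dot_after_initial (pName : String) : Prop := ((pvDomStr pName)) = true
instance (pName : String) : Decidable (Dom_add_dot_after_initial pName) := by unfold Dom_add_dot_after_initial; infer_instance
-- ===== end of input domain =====

-- B replaces A's per-character loop (index counter + accumulator) by a closed form:
-- replace the spaces in the first seven characters and append the untouched tail (simpler).


-- ===== PORT A =====
-- the loop body: lReturn += '. ' for a space at position < 7, else lReturn += char; lPosition += 1
def pvStepA (st : List Char × Int) (c : Char) : List Char × Int :=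
  if c = ' ' ∧ st.2 < 7 then (st.1 ++ ['.', ' '], st.2 + 1) else (st.1 ++ [c], st.2 + 1)

def add_dot_after_initial (pName : String) : String :=
  if PySem.Str.find (PySem.Str.strip pName) " " = 1 then
    String.ofList (pName.toList.foldl pvStepA ([], 0)).1
  else pName

-- ===== PORT B =====
def add_dot_after_initial_alt (pName : String) : String :=
  if PySem.Str.find (PySem.Str.strip pName) " " = 1 then
    String.ofList (PySem.Chars.replace (PySem.Chars.slice pName.toList none (some 7)) [' '] ['.', ' ']
               ++ PySem.Chars.slice pName.toList (some 7) none)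
  else pName

-- ===== PRECONDITION & SPEC =====
def Spec_add_dot_after_initial (pName : String) (out : String) : Prop := out = add_dot_after_initial_alt pName
instance (pName : String) (out : String) : Decidable (Spec_add_dot_after_initial pName out) := by unfold Spec_add_dot_after_initial; infer_instance

-- ===== CLAIM (what is proved, stated in full; the proofs are below) =====
def Claim_equal_add_dot_after_initial : Prop := ∀ (pName : String), Dom_add_dot_after_initial pName → Spec_add_dot_after_initial pName (add_dot_after_initial pName)

-- ===== LEMMAS AND PROOFS =====

-- per-character expansion used by both characterisations
def pvRep (c : Char) : List Char := if c = ' ' then ['.', ' '] else [c]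

-- replace with the single-character pattern ' ' expands each character independently
lemma replace_go_single (cs : List Char) : ∀ (fuel : Nat) (acc : List Char), cs.length ≤ fuel →
    PySem.Chars.replace.go [' '] ['.', ' '] fuel cs acc = acc.reverse ++ cs.flatMap pvRep := by
  induction cs with
  | nil => intro fuel acc _; cases fuel <;> simp [PySem.Chars.replace.go]
  | cons c t ih =>
    intro fuel acc h
    cases fuel with
    | zero => simp at h
    | succ f =>
      by_cases hc : c = ' '
      · subst hc
        rw [show PySem.Chars.replace.go [' '] ['.', ' '] (f+1) (' ' :: t) acc
              = PySem.Chars.replace.go [' '] ['.', ' '] f t ([' ', '.'] ++ acc) by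
            simp [PySem.Chars.replace.go, List.isPrefixOf]]
        rw [ih f ([' ', '.'] ++ acc) (by simpa using h)]
        simp [pvRep]
      · rw [show PySem.Chars.replace.go [' '] ['.', ' '] (f+1) (c :: t) acc
              = PySem.Chars.replace.go [' '] ['.', ' '] f t (c :: acc) by
            simp [PySem.Chars.replace.go, List.isPrefixOf]
            exact fun hs => absurd hs.symm hc]
        rw [ih f (c :: acc) (by simpa using h)]
        simp [pvRep, hc]

lemma replace_single (cs : List Char) :
    PySem.Chars.replace cs [' '] ['.', ' '] = cs.flatMap pvRep := by
  rw [PySem.Chars.replace]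
  simpa using replace_go_single cs cs.length [] le_rfl

-- A's loop over the first part (all positions < 7) expands characters like pvRep
lemma loopA_lt (cs : List Char) : ∀ (acc : List Char) (k : Nat), cs.length + k ≤ 7 →
    cs.foldl pvStepA (acc, (k : Int)) = (acc ++ cs.flatMap pvRep, ((k + cs.length : Nat) : Int)) := by
  induction cs with
  | nil => intro acc k _; simp
  | cons c t ih =>
    intro acc k h
    by_cases hc : c = ' '
    · have hk7 : (k : Int) < 7 := by
        have : k < 7 := by simp at h; omega
        exact_mod_cast this
      have hstep : pvStepA (acc, (k : Int)) c = (acc ++ ['.', ' '], ((k+1 : Nat) : Int)) := by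
        simp [pvStepA, hc, hk7]
      simp only [List.foldl_cons, hstep]
      rw [ih (acc ++ ['.', ' ']) (k+1) (by simp only [List.length_cons] at h; omega)]
      simp [pvRep, hc]
      omega
    · have hstep : pvStepA (acc, (k : Int)) c = (acc ++ [c], ((k+1 : Nat) : Int)) := by
        simp [pvStepA, hc]
      simp only [List.foldl_cons, hstep]
      rw [ih (acc ++ [c]) (k+1) (by simp only [List.length_cons] at h; omega)]
      simp [pvRep, hc]
      omega

-- A's loop past position 7 copies characters unchanged
lemma loopA_ge (cs : List Char) : ∀ (acc : List Char) (k : Int), 7 ≤ k →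
    (cs.foldl pvStepA (acc, k)).1 = acc ++ cs := by
  induction cs with
  | nil => intro acc k _; simp
  | cons c t ih =>
    intro acc k h
    have : pvStepA (acc, k) c = (acc ++ [c], k + 1) := by
      simp [pvStepA]; intro _; omega
    simp only [List.foldl_cons, this]
    rw [ih (acc ++ [c]) (k + 1) (by omega)]
    simp

-- the whole loop = replace on the first 7 characters ++ untouched tail
lemma loopA_closed (cs : List Char) :
    (cs.foldl pvStepA ([], 0)).1 = (cs.take 7).flatMap pvRep ++ cs.drop 7 := by
  have hsplit : cs = cs.take 7 ++ cs.drop 7 := (List.take_append_drop 7 cs).symm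
  conv_lhs => rw [hsplit]
  rw [List.foldl_append]
  have h0 : ((0 : Nat) : Int) = (0 : Int) := rfl
  rw [← h0, loopA_lt (cs.take 7) [] 0 (by simp)]
  by_cases hlen : 7 ≤ cs.length
  · have hl : (cs.take 7).length = 7 := by simp [hlen]
    rw [loopA_ge (cs.drop 7) _ _ (by rw [hl]; norm_num)]
    simp
  · have : cs.drop 7 = [] := by
      apply List.drop_eq_nil_of_le; omega
    simp [this]

theorem pv_main (pName : String) :
    add_dot_after_initial pName = add_dot_after_initial_alt pName := by
  unfold add_dot_after_initial add_dot_after_initial_alt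
  split
  · congr 1
    rw [loopA_closed, replace_single]
    have h7 : PySem.Chars.slice pName.toList none (some 7) = pName.toList.take 7 := by
      simp [pysem]
    have h7' : PySem.Chars.slice pName.toList (some 7) none = pName.toList.drop 7 := by
      simp [pysem]
    rw [h7, h7']
  · rfl

-- ===== VERDICT (by name: the statement is the Claim_ definition above) =====
theorem add_dot_after_initial_spec : Claim_equal_add_dot_after_initial := by
  intro pName _
  unfold Spec_add_dot_after_initial
  exact pv_main pName
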